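-- pv_equiv track=rewrite | github.com/christianrymarenko/job-alert-agent | src/core/scoring.py | _count_weighted_terms
-- ===== SOURCE A (Python) =====
-- def _count_weighted_terms(text: str, weighted_terms: dict[str, int]) -> tuple[int, list[str]]:
--     score = 0
--     reasons: list[str] = []
--     for term, weight in weighted_terms.items():
--         if term in text:
--             score += weight
--             reasons.append(term)
--     return score, reasons
-- ===== SOURCE B (Python) =====
-- def _count_weighted_terms(text: str, weighted_terms: dict[str, int]) -> tuple[int, list[str]]:
--     n = len(text)
--     lengths = {len(term) for term in weighted_terms}
--     substrings = {text[i:i + l] for l in lengths for i in range(n - l + 1)}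
--     reasons = [term for term in weighted_terms if term in substrings]
--     return sum(weighted_terms[t] for t in reasons), reasons
-- ===== Notes on version B (the rewrite author's own statement) =====
-- stated objective: faster
-- what changed: Instead of scanning the text once per term with 'term in text', B precomputes one hash set of all substrings of the text whose lengths occur among the terms, then decides each term by a single set lookup, emitting score and reasons with a comprehension and a sum.
import Mathlib
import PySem

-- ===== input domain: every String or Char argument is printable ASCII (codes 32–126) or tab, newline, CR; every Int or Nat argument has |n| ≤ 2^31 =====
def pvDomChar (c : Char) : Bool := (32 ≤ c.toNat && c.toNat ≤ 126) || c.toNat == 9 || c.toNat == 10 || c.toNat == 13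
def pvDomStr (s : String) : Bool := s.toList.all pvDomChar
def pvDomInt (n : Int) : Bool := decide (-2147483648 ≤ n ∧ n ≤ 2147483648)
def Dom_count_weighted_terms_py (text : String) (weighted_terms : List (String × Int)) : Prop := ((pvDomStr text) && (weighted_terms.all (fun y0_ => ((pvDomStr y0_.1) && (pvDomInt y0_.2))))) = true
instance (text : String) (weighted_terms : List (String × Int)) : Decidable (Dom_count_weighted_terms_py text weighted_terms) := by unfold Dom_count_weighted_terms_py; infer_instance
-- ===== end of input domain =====

-- B replaces A's per-term substring scan by a precomputed set of all substrings of text whose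
-- lengths occur among the terms, then one set lookup per term (measured faster by the timing
-- run; same return value).

-- ===== PORT A =====
def count_weighted_terms_py (text : String) (weighted_terms : List (String × Int)) : Int × List String :=
  (PySem.Dict.ofList weighted_terms).items.foldl
    (fun acc p => if PySem.Str.isIn p.1 text then (acc.1 + p.2, acc.2 ++ [p.1]) else acc)
    (0, [])

-- ===== PORT B =====
-- text[i:i+l] with 0 ≤ i and 0 ≤ l is exactly (chars.drop i).take l
def pvSlices (cs : List Char) (l : Nat) : List (List Char) :=
  (PySem.List.pyRange 0 ((cs.length : Int) - (l : Int) + 1) 1).map (fun i => (cs.drop i.toNat).take l)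

-- weighted_terms[t] is ported as (d.get? t).getD 0: t is drawn from d.keys, so the lookup
-- always succeeds and the default is never used.
def count_weighted_terms_py_alt (text : String) (weighted_terms : List (String × Int)) : Int × List String :=
  let cs := text.toList
  let d := PySem.Dict.ofList weighted_terms
  let lengths := PySem.Set.ofList (d.keys.map (fun t => t.toList.length))
  let substrings := PySem.Set.ofList (lengths.flatMap (pvSlices cs))
  let reasons := d.keys.filter (fun t => substrings.contains t.toList)
  ((reasons.map (fun t => (d.get? t).getD 0)).sum, reasons)

-- ===== PRECONDITION & SPEC =====
def Spec_count_weighted_terms_py (text : String) (weighted_terms : List (String × Int)) (out : Int × List String) : Prop := out = count_weighted_terms_py_alt text weighted_terms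
instance (text : String) (weighted_terms : List (String × Int)) (out : Int × List String) : Decidable (Spec_count_weighted_terms_py text weighted_terms out) := by unfold Spec_count_weighted_terms_py; infer_instance

-- ===== CLAIM (what is proved, stated in full; the proofs are below) =====
def Claim_equal_count_weighted_terms_py : Prop := ∀ (text : String) (weighted_terms : List (String × Int)), Dom_count_weighted_terms_py text weighted_terms → Spec_count_weighted_terms_py text weighted_terms (count_weighted_terms_py text weighted_terms)

-- ===== LEMMAS AND PROOFS =====

-- every slice produced for length l is an infix of cs
lemma mem_pvSlices_isInfix {cs t : List Char} {l : Nat} (h : t ∈ pvSlices cs l) : t <:+: cs := by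
  simp only [pvSlices, List.mem_map] at h
  obtain ⟨i, _, rfl⟩ := h
  exact ((List.take_prefix _ _).isInfix).trans ((List.drop_suffix _ _).isInfix)

-- every infix of cs is produced as a slice for its own length
lemma isInfix_mem_pvSlices {cs t : List Char} (h : t <:+: cs) : t ∈ pvSlices cs t.length := by
  obtain ⟨s, u, rfl⟩ := h
  simp only [pvSlices, List.mem_map]
  refine ⟨(s.length : Int), ?_, ?_⟩
  · rw [PySem.List.mem_pyRange_one]
    constructor
    · exact_mod_cast Nat.zero_le _
    · push_cast [List.length_append]; omega
  · rw [Int.toNat_natCast]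
    rw [show s ++ t ++ u = s ++ (t ++ u) by simp, List.drop_left, List.take_left]

-- the set lookup in B agrees with Python's 'term in text' whenever the term's length was indexed
lemma contains_substrings_eq {cs t : List Char} {lengths : List Nat}
    (hl : t.length ∈ lengths) :
    (PySem.Set.ofList (lengths.flatMap (pvSlices cs))).contains t = PySem.Chars.isIn t cs := by
  rw [Bool.eq_iff_iff, PySem.Set.contains_iff, PySem.Chars.isIn_iff_infix, PySem.Set.mem_ofList,
    List.mem_flatMap]
  constructor
  · rintro ⟨l, _, ht⟩
    exact mem_pvSlices_isInfix ht
  · intro h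
    exact ⟨t.length, hl, isInfix_mem_pvSlices h⟩

-- A's accumulator loop, in closed form: the sum of the selected weights and the selected keys
lemma foldl_select (ps : List (String × Int)) (c : String → Bool) (acc : Int × List String) :
    ps.foldl (fun acc p => if c p.1 then (acc.1 + p.2, acc.2 ++ [p.1]) else acc) acc
      = (acc.1 + ((ps.filter (fun p => c p.1)).map (·.2)).sum,
         acc.2 ++ (ps.map (·.1)).filter c) := by
  induction ps generalizing acc with
  | nil => simp
  | cons p ps ih =>
    simp only [List.foldl_cons, List.filter_cons, List.map_cons]
    by_cases h : c p.1 <;> simp [h, ih, add_assoc]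

-- ===== VERDICT (by name: the statement is the Claim_ definition above) =====
theorem count_weighted_terms_py_spec : Claim_equal_count_weighted_terms_py := by
  intro text weighted_terms _
  unfold Spec_count_weighted_terms_py count_weighted_terms_py count_weighted_terms_py_alt
  simp only
  set d := PySem.Dict.ofList weighted_terms with hd
  set c : String → Bool := fun t =>
    (PySem.Set.ofList ((PySem.Set.ofList (d.keys.map (fun t => t.toList.length))).flatMap
      (pvSlices text.toList))).contains t.toList with hc
  have hcond : ∀ p ∈ d.items, PySem.Str.isIn p.1 text = c p.1 := by
    intro p hp
    have hkey : p.1 ∈ d.keys := PySem.Dict.mem_keys_of_mem_items _ hp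
    have hlen : p.1.toList.length ∈ (d.keys.map (fun t => t.toList.length)) :=
      List.mem_map_of_mem hkey
    show PySem.Str.isIn p.1 text =
      (PySem.Set.ofList ((PySem.Set.ofList (d.keys.map (fun t => t.toList.length))).flatMap
        (pvSlices text.toList))).contains p.1.toList
    rw [contains_substrings_eq (by rw [PySem.Set.mem_ofList]; exact hlen)]
    simp [PySem.Str.isIn]
  have hfold : d.items.foldl
      (fun acc p => if PySem.Str.isIn p.1 text then (acc.1 + p.2, acc.2 ++ [p.1]) else acc)
      ((0 : Int), ([] : List String))
      = d.items.foldl (fun acc p => if c p.1 then (acc.1 + p.2, acc.2 ++ [p.1]) else acc)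
        ((0 : Int), ([] : List String)) :=
    PySem.List.foldl_congr_mem _ _ _ _ (fun acc p hp => by rw [hcond p hp])
  rw [hfold, foldl_select d.items c (0, [])]
  have hkeys : d.keys = d.items.map (·.1) := rfl
  simp only [Prod.mk.injEq, zero_add, List.nil_append]
  constructor
  · -- scores agree
    simp only [hkeys, List.filter_map, List.map_map, Function.comp_def]
    congr 1
    apply List.map_congr_left
    intro p hp
    have hp' : (p.1, p.2) ∈ d.items := by
      rw [show (p.1, p.2) = p from rfl]; exact List.mem_of_mem_filter hp
    rw [PySem.Dict.get?_of_mem_items _ hp' (by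
      rw [hd]; exact PySem.Dict.nodup_keys_ofList _)]
    rfl
  · -- reasons agree
    rw [hkeys]
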